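-- pv_equiv track=rewrite | github.com/robertcprice/nCPU | tools/analysis/honest_benchmark.py | detect_patterns_in_trace
-- ===== SOURCE A (Python) =====
-- def detect_patterns_in_trace(trace):
--     """Analyze trace and count patterns."""
--
--     patterns = {
--         'memset_loops': 0,
--         'memcpy_loops': 0,
--         'polling_loops': 0,
--         'arithmetic_loops': 0,
--     }
--
--     # Look for repeating instruction sequences
--     for i in range(len(trace) - 10):
--         window = trace[i:i+10]
--
--         # Count operations in window
--         stores = sum(1 for inst in window if inst and len(inst) >= 7 and inst[5])
--         loads = sum(1 for inst in window if inst and len(inst) >= 7 and inst[4])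
--         branches = sum(1 for inst in window if inst and len(inst) >= 7 and inst[3] == 10)
--
--         if stores > 0 and branches > 0:
--             patterns['memset_loops'] += 1
--         elif loads > 0 and branches > 0:
--             patterns['polling_loops'] += 1
--
--     return patterns
-- ===== SOURCE B (Python) =====
-- def detect_patterns_in_trace(trace):
--     """Analyze trace and count patterns (prefix-count arrays + O(1) window sums)."""
--
--     ps = [0]
--     acc = 0
--     for inst in trace:
--         if inst and len(inst) >= 7 and inst[5]:
--             acc += 1
--         ps.append(acc)
--
--     pl = [0]
--     acc = 0
--     for inst in trace:
--         if inst and len(inst) >= 7 and inst[4]: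
--             acc += 1
--         pl.append(acc)
--
--     pb = [0]
--     acc = 0
--     for inst in trace:
--         if inst and len(inst) >= 7 and inst[3] == 10:
--             acc += 1
--         pb.append(acc)
--
--     memset = 0
--     polling = 0
--     for i in range(len(trace) - 10):
--         if pb[i + 10] > pb[i]:
--             if ps[i + 10] > ps[i]:
--                 memset += 1
--             elif pl[i + 10] > pl[i]:
--                 polling += 1
--
--     return {
--         'memset_loops': memset,
--         'memcpy_loops': 0,
--         'polling_loops': polling,
--         'arithmetic_loops': 0,
--     }
-- ===== Notes on version B (the rewrite author's own statement) =====
-- stated objective: alternative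
-- what changed: B builds three prefix-count arrays in one pass each and evaluates every sliding window's stores/loads/branches as a prefix difference, instead of A's rescanning the 10 elements of each window three times.
import Mathlib
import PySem

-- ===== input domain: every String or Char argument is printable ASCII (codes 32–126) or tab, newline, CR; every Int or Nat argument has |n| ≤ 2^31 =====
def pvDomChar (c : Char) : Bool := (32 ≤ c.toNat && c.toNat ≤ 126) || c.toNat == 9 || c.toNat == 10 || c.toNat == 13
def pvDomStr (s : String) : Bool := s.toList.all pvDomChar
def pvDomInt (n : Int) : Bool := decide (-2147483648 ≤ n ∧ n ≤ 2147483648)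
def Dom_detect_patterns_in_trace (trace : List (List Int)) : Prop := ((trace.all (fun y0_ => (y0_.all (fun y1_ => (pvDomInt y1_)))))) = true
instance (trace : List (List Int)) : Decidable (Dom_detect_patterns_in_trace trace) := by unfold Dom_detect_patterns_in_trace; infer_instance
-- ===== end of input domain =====

-- B replaces A's per-window recount with three prefix-count arrays and per-window prefix differences: a different decomposition of the same count.


-- ===== PORT A =====
-- the three guards 'inst and len(inst) >= 7 and inst[k] …' (shared text in both Pythons)
def predStore (inst : List Int) : Bool :=
  !inst.isEmpty && decide (7 ≤ inst.length) && (PySem.List.pyGetD inst 5 0 != 0)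
def predLoad (inst : List Int) : Bool :=
  !inst.isEmpty && decide (7 ≤ inst.length) && (PySem.List.pyGetD inst 4 0 != 0)
def predBranch (inst : List Int) : Bool :=
  !inst.isEmpty && decide (7 ≤ inst.length) && (PySem.List.pyGetD inst 3 0 == 10)

-- sum(1 for inst in window if p(inst))
def windowCount (p : List Int → Bool) (window : List (List Int)) : Int :=
  window.foldl (fun acc inst => if p inst then acc + 1 else acc) 0

-- one iteration of A's 'for i in range(len(trace) - 10)' loop body
def aStep (trace : List (List Int)) (patterns : PySem.Dict String Int) (i : Int) :
    PySem.Dict String Int :=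
  let window := PySem.List.slice trace (some i) (some (i + 10))
  let stores := windowCount predStore window
  let loads := windowCount predLoad window
  let branches := windowCount predBranch window
  if stores > 0 && branches > 0 then patterns.modify "memset_loops" 0 (· + 1)
  else if loads > 0 && branches > 0 then patterns.modify "polling_loops" 0 (· + 1)
  else patterns

def detect_patterns_in_trace (trace : List (List Int)) : List (String × Int) :=
  let patterns : PySem.Dict String Int :=
    PySem.Dict.ofList
      [("memset_loops", 0), ("memcpy_loops", 0), ("polling_loops", 0), ("arithmetic_loops", 0)]
  ((PySem.List.pyRange 0 ((trace.length : Int) - 10) 1).foldl (aStep trace) patterns).items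

-- ===== PORT B =====
-- one of B's prefix loops: out = [0]; for inst in trace: if <guard>: acc += 1; out.append(acc)
def prefixCounts (p : List Int → Bool) : List (List Int) → Int → List Int
  | [], acc => [acc]
  | inst :: rest, acc => acc :: prefixCounts p rest (if p inst then acc + 1 else acc)

-- one iteration of B's second loop, over the counter pair (memset, polling)
def bStep (ps pl pb : List Int) (c : Int × Int) (i : Int) : Int × Int :=
  if PySem.List.pyGetD pb (i + 10) 0 > PySem.List.pyGetD pb i 0 then
    if PySem.List.pyGetD ps (i + 10) 0 > PySem.List.pyGetD ps i 0 then (c.1 + 1, c.2)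
    else if PySem.List.pyGetD pl (i + 10) 0 > PySem.List.pyGetD pl i 0 then (c.1, c.2 + 1)
    else c
  else c

def detect_patterns_in_trace_alt (trace : List (List Int)) : List (String × Int) :=
  let ps := prefixCounts predStore trace 0
  let pl := prefixCounts predLoad trace 0
  let pb := prefixCounts predBranch trace 0
  let r := (PySem.List.pyRange 0 ((trace.length : Int) - 10) 1).foldl (bStep ps pl pb) (0, 0)
  [("memset_loops", r.1), ("memcpy_loops", 0), ("polling_loops", r.2), ("arithmetic_loops", 0)]

-- ===== PRECONDITION & SPEC =====
def Spec_detect_patterns_in_trace (trace : List (List Int)) (out : List (String × Int)) : Prop := out = detect_patterns_in_trace_alt trace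
instance (trace : List (List Int)) (out : List (String × Int)) : Decidable (Spec_detect_patterns_in_trace trace out) := by unfold Spec_detect_patterns_in_trace; infer_instance

-- ===== CLAIM (what is proved, stated in full; the proofs are below) =====
def Claim_equal_detect_patterns_in_trace : Prop := ∀ (trace : List (List Int)), Dom_detect_patterns_in_trace trace → Spec_detect_patterns_in_trace trace (detect_patterns_in_trace trace)

-- ===== LEMMAS AND PROOFS =====

-- A's dict keeps the four literal keys throughout; only the two counters vary.
def canon (a b : Int) : PySem.Dict String Int :=
  PySem.Dict.ofList
    [("memset_loops", a), ("memcpy_loops", 0), ("polling_loops", b), ("arithmetic_loops", 0)]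

theorem canon_modify_mem (a b : Int) :
    (canon a b).modify "memset_loops" 0 (· + 1) = canon (a + 1) b := rfl

theorem canon_modify_pol (a b : Int) :
    (canon a b).modify "polling_loops" 0 (· + 1) = canon a (b + 1) := rfl

theorem prefixCounts_getD (p : List Int → Bool) :
    ∀ (xs : List (List Int)) (acc : Int) (k : Nat), k ≤ xs.length →
      (prefixCounts p xs acc).getD k 0 = acc + ((xs.take k).countP p : Int) := by
  intro xs
  induction xs with
  | nil =>
    intro acc k hk
    have hk0 : k = 0 := by simpa using hk
    subst hk0; simp [prefixCounts]
  | cons x t ih =>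
    intro acc k hk
    cases k with
    | zero => simp [prefixCounts]
    | succ k =>
      simp only [prefixCounts, List.getD_cons_succ, List.take_succ_cons, List.countP_cons]
      rw [ih _ k (by simpa using hk)]
      by_cases h : p x = true <;> simp [h] <;> omega

theorem windowCount_eq_countP (p : List Int → Bool) (w : List (List Int)) :
    windowCount p w = (w.countP p : Int) := by
  simpa using PySem.List.foldl_if_add_one p w 0

-- a window count equals the difference of the corresponding prefix counts
theorem window_eq_prefix_diff (p : List Int → Bool) (trace : List (List Int)) (i : Int)
    (h0 : 0 ≤ i) (h1 : i + 10 ≤ (trace.length : Int)) :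
    windowCount p (PySem.List.slice trace (some i) (some (i + 10))) =
      PySem.List.pyGetD (prefixCounts p trace 0) (i + 10) 0 -
        PySem.List.pyGetD (prefixCounts p trace 0) i 0 := by
  rw [windowCount_eq_countP,
    PySem.List.pyGetD_of_nonneg _ _ (by omega : (0:Int) ≤ i + 10),
    PySem.List.pyGetD_of_nonneg _ _ h0,
    PySem.List.slice_toNat trace h0 (by omega : (0:Int) ≤ i + 10)]
  have hlen : i.toNat ≤ trace.length ∧ (i + 10).toNat ≤ trace.length := by omega
  rw [prefixCounts_getD p trace 0 _ hlen.2, prefixCounts_getD p trace 0 _ hlen.1,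
    show (i + 10).toNat = i.toNat + 10 from by omega,
    show i.toNat + 10 - i.toNat = 10 from by omega,
    List.take_add, List.countP_append]
  push_cast
  ring

-- one step of A, on the canonical dict, is one step of B on the counter pair
theorem step_eq (trace : List (List Int)) (i : Int) (a b : Int)
    (h0 : 0 ≤ i) (h1 : i + 10 ≤ (trace.length : Int)) :
    aStep trace (canon a b) i =
      canon (bStep (prefixCounts predStore trace 0) (prefixCounts predLoad trace 0)
          (prefixCounts predBranch trace 0) (a, b) i).1
        (bStep (prefixCounts predStore trace 0) (prefixCounts predLoad trace 0)
          (prefixCounts predBranch trace 0) (a, b) i).2 := by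
  unfold aStep bStep
  have hS := window_eq_prefix_diff predStore trace i h0 h1
  have hL := window_eq_prefix_diff predLoad trace i h0 h1
  have hB := window_eq_prefix_diff predBranch trace i h0 h1
  simp only [gt_iff_lt, Bool.and_eq_true, decide_eq_true_eq]
  split_ifs <;>
    first
      | rfl
      | exact canon_modify_mem a b
      | exact canon_modify_pol a b
      | omega

theorem fold_eq (trace : List (List Int)) :
    ∀ (is : List Int), (∀ i ∈ is, 0 ≤ i ∧ i + 10 ≤ (trace.length : Int)) → ∀ (a b : Int),
      is.foldl (aStep trace) (canon a b) =
        canon (is.foldl (bStep (prefixCounts predStore trace 0) (prefixCounts predLoad trace 0)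
            (prefixCounts predBranch trace 0)) (a, b)).1
          (is.foldl (bStep (prefixCounts predStore trace 0) (prefixCounts predLoad trace 0)
            (prefixCounts predBranch trace 0)) (a, b)).2 := by
  intro is
  induction is with
  | nil => intro _ a b; rfl
  | cons i t ih =>
    intro h a b
    have hi := h i (by simp)
    simp only [List.foldl_cons]
    rw [step_eq trace i a b hi.1 hi.2]
    have := ih (fun j hj => h j (List.mem_cons_of_mem _ hj))
      (bStep (prefixCounts predStore trace 0) (prefixCounts predLoad trace 0)
        (prefixCounts predBranch trace 0) (a, b) i).1
      (bStep (prefixCounts predStore trace 0) (prefixCounts predLoad trace 0)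
        (prefixCounts predBranch trace 0) (a, b) i).2
    simpa using this

-- ===== VERDICT (by name: the statement is the Claim_ definition above) =====
theorem detect_patterns_in_trace_spec : Claim_equal_detect_patterns_in_trace := by
  intro trace _
  unfold Spec_detect_patterns_in_trace detect_patterns_in_trace detect_patterns_in_trace_alt
  have hmem : ∀ i ∈ PySem.List.pyRange 0 ((trace.length : Int) - 10) 1,
      0 ≤ i ∧ i + 10 ≤ (trace.length : Int) := by
    intro i hi
    rw [PySem.List.mem_pyRange_one] at hi
    omega
  show ((PySem.List.pyRange 0 ((trace.length : Int) - 10) 1).foldl (aStep trace) (canon 0 0)).items =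
    (let r := (PySem.List.pyRange 0 ((trace.length : Int) - 10) 1).foldl
        (bStep (prefixCounts predStore trace 0) (prefixCounts predLoad trace 0)
          (prefixCounts predBranch trace 0)) (0, 0)
     [("memset_loops", r.1), ("memcpy_loops", 0), ("polling_loops", r.2), ("arithmetic_loops", 0)])
  rw [fold_eq trace _ hmem 0 0]
  rfl
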